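-- pv_equiv track=rewrite | github.com/lenaecs/Advent-of-Code-2016 | Code/Day 18.py | minesweep
-- ===== SOURCE A (Python) =====
-- def minesweep(input_str, length):
--     safe_squares = 0
--     current_string = '.' + input_str + '.'
--     for char in input_str:
--         if char == '.':
--             safe_squares += 1
--     for i in range(length - 1):
--         new_string = ''
--         for j in range(1, len(current_string) - 1):
--             if current_string[j - 1] != current_string[j + 1]:
--                 new_string += '^'
--             else:
--                 new_string += '.'
--                 safe_squares += 1
--         current_string = '.' + new_string + '.'
--     return safe_squares
-- ===== SOURCE B (Python) =====
-- def minesweep(input_str, length):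
--     width = len(input_str)
--     safe = input_str.count('.')
--     if length <= 1:
--         return safe
--     # First evolution compares the actual characters (walls are safe '.'),
--     # packed into an int bitmask, MSB = leftmost cell.
--     padded = '.' + input_str + '.'
--     cur = 0
--     for j in range(1, width + 1):
--         cur = (cur << 1) | (padded[j - 1] != padded[j + 1])
--     safe += width - bin(cur).count('1')
--     # Remaining evolutions are bit-parallel Rule 90 over the whole row.
--     mask = (1 << width) - 1
--     for _ in range(length - 2):
--         cur = ((cur << 1) ^ (cur >> 1)) & mask
--         safe += width - bin(cur).count('1')
--     return safe
-- ===== Notes on version B (the rewrite author's own statement) =====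
-- stated objective: faster
-- what changed: Rows are packed into a single Python int bitmask and each generation is computed bit-parallel as ((cur<<1)^(cur>>1))&mask with popcount for the safe count, instead of A's per-cell string comparison loop building a new string each generation.
import Mathlib
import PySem

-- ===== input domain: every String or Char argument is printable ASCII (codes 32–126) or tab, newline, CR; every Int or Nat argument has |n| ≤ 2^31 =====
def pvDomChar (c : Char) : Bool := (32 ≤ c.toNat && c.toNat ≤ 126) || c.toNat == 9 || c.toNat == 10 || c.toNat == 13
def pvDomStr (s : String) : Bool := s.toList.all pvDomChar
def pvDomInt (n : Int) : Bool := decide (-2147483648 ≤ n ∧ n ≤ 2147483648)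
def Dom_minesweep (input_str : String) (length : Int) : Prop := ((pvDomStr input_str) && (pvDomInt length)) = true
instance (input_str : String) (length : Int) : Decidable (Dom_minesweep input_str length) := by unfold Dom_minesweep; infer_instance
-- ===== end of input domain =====

-- B replaces A's per-cell string-comparison loop by a bit-parallel Rule-90 update of an integer
-- bitmask (one shift-xor-mask step per generation); objective: faster.

-- ===== PORT A =====
def minesweep (input_str : String) (length : Int) : Int :=
  let chars := input_str.toList
  let safe0 : Int := chars.foldl (fun a c => if c = '.' then a + 1 else a) 0
  let start : List Char × Int := ('.' :: chars ++ ['.'], safe0)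
  let res := (PySem.List.pyRange 0 (length - 1) 1).foldl (fun st _ =>
      let cs := st.1
      let inner := (PySem.List.pyRange 1 (PySem.List.len cs - 1) 1).foldl
        (fun (t : List Char × Int) j =>
          if PySem.List.pyGetD cs (j - 1) ' ' ≠ PySem.List.pyGetD cs (j + 1) ' '
          then (t.1 ++ ['^'], t.2)
          else (t.1 ++ ['.'], t.2 + 1)) (([] : List Char), st.2)
      ('.' :: inner.1 ++ ['.'], inner.2)) start
  res.2

-- ===== PORT B =====
def minesweep_alt (input_str : String) (length : Int) : Int :=
  let chars := input_str.toList
  let width : Nat := chars.length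
  let safe : Int := (PySem.Str.count input_str "." : Int)
  if length ≤ 1 then safe
  else
    let padded : List Char := '.' :: chars ++ ['.']
    let cur : Int := (PySem.List.pyRange 1 ((width : Int) + 1) 1).foldl
      (fun c j =>
        PySem.Int.bor (c <<< (1 : Nat))
          (if PySem.List.pyGetD padded (j - 1) ' ' ≠ PySem.List.pyGetD padded (j + 1) ' ' then 1 else 0)) 0
    let safe1 : Int := safe + (width : Int) - (PySem.Int.bitCount cur : Int)
    let mask : Int := (1 : Int) <<< width - 1
    let res := (PySem.List.pyRange 0 (length - 2) 1).foldl
      (fun (st : Int × Int) _ =>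
        let nx := PySem.Int.band (PySem.Int.bxor (st.1 <<< (1 : Nat)) (st.1 >>> (1 : Nat))) mask
        (nx, st.2 + (width : Int) - (PySem.Int.bitCount nx : Int))) (cur, safe1)
    res.2

-- ===== PRECONDITION & SPEC =====
def Spec_minesweep (input_str : String) (length : Int) (out : Int) : Prop := out = minesweep_alt input_str length
instance (input_str : String) (length : Int) (out : Int) : Decidable (Spec_minesweep input_str length out) := by unfold Spec_minesweep; infer_instance

-- ===== CLAIM (what is proved, stated in full; the proofs are below) =====
def Claim_equal_minesweep : Prop := ∀ (input_str : String) (length : Int), Dom_minesweep input_str length → Spec_minesweep input_str length (minesweep input_str length)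

-- ===== LEMMAS AND PROOFS =====

def pvBit (c : Char) : Nat := if c = '^' then 1 else 0
def pvStep : List Char → List Char
  | a :: b :: c :: t => (if a ≠ c then '^' else '.') :: pvStep (b :: c :: t)
  | _ => []
def pvVal (l : List Char) : Nat := l.foldl (fun n c => 2 * n + pvBit c) 0
def pvOk (l : List Char) : Prop := ∀ c ∈ l, c = '.' ∨ c = '^'

theorem pvStep_length (cs : List Char) : (pvStep cs).length = cs.length - 2 := by
  induction cs using pvStep.induct with
  | case1 a b c t ih => simp [pvStep, ih]
  | case2 cs h => cases cs with
    | nil => simp [pvStep]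
    | cons x xs => cases xs with
      | nil => simp [pvStep]
      | cons y ys => cases ys with
        | nil => simp [pvStep]
        | cons z zs => exact absurd rfl (h x y z zs)

theorem pvStep_ok (cs : List Char) : pvOk (pvStep cs) := by
  induction cs using pvStep.induct with
  | case1 a b c t ih =>
      intro x hx
      simp [pvStep] at hx
      rcases hx with h | h
      · split at h <;> simp [h]
      · exact ih x h
  | case2 cs h => intro x hx; cases cs with
    | nil => simp [pvStep] at hx
    | cons a as => cases as with
      | nil => simp [pvStep] at hx
      | cons b bs => cases bs with
        | nil => simp [pvStep] at hx
        | cons z zs => exact absurd rfl (h a b z zs)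

theorem pvFoldl_const {α β : Type} (l : List α) (F : β → β) (init : β) :
    l.foldl (fun st _ => F st) init = F^[l.length] init := by
  induction l generalizing init with
  | nil => rfl
  | cons x xs ih => simp [List.foldl_cons, ih, Function.iterate_succ_apply]

theorem pvVal_foldl (l : List Char) (n : Nat) :
    l.foldl (fun n c => 2 * n + pvBit c) n = n * 2 ^ l.length + pvVal l := by
  induction l generalizing n with
  | nil => simp [pvVal]
  | cons c t ih =>
      simp only [List.foldl_cons, List.length_cons]
      rw [ih]
      conv_rhs => rw [pvVal, List.foldl_cons, ih]
      ring

theorem pvVal_cons (c : Char) (t : List Char) :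
    pvVal (c :: t) = pvBit c * 2 ^ t.length + pvVal t := by
  rw [pvVal, List.foldl_cons, pvVal_foldl]
  ring

theorem pvVal_append (l : List Char) (c : Char) :
    pvVal (l ++ [c]) = 2 * pvVal l + pvBit c := by
  rw [pvVal, List.foldl_append]
  simp [pvVal]

theorem pvVal_lt (l : List Char) : pvVal l < 2 ^ l.length := by
  induction l with
  | nil => simp [pvVal]
  | cons c t ih =>
      rw [pvVal_cons]
      have hb : pvBit c ≤ 1 := by unfold pvBit; split <;> omega
      have : (2:Nat) ^ (c :: t).length = 2 * 2 ^ t.length := by rw [List.length_cons]; ring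
      rw [this]
      nlinarith

theorem pvStep_getD (cs : List Char) : ∀ (k : Nat), k < cs.length - 2 →
    (pvStep cs).getD k ' ' = if cs.getD k ' ' ≠ cs.getD (k + 2) ' ' then '^' else '.' := by
  induction cs using pvStep.induct with
  | case1 a b c t ih =>
      intro k hk
      cases k with
      | zero => simp [pvStep]
      | succ k =>
          simp only [pvStep, List.getD_cons_succ]
          rw [ih k (by simp at hk ⊢; omega)]
          rfl
  | case2 cs h =>
      intro k hk
      cases cs with
      | nil => simp at hk
      | cons x xs => cases xs with
        | nil => simp at hk
        | cons y ys => cases ys with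
          | nil => simp at hk
          | cons z zs => exact absurd rfl (h x y z zs)

theorem pvMap_range_step (cs : List Char) :
    (List.range (cs.length - 2)).map
      (fun k => if cs.getD k ' ' ≠ cs.getD (k + 2) ' ' then '^' else '.') = pvStep cs := by
  apply List.ext_getElem
  · simp [pvStep_length cs]
  · intro i h1 h2
    simp only [List.getElem_map, List.getElem_range]
    rw [← List.getD_eq_getElem (pvStep cs) ' ' h2]
    rw [pvStep_getD cs i (by simpa [pvStep_length] using h2)]

theorem pvTestBit_val (l : List Char) : ∀ (i : Nat),
    (pvVal l).testBit i = (decide (i < l.length) && decide (l.getD (l.length - 1 - i) ' ' = '^')) := by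
  induction l with
  | nil => intro i; simp [pvVal]
  | cons c t ih =>
      intro i
      rw [pvVal_cons, Nat.mul_comm, Nat.testBit_two_pow_mul_add (pvBit c) (pvVal_lt t) i]
      rcases Nat.lt_trichotomy i t.length with hi | hi | hi
      · rw [if_pos hi, ih i]
        have h1 : (c :: t).length - 1 - i = (t.length - 1 - i) + 1 := by simp; omega
        simp only [h1, List.getD_cons_succ]
        simp [hi, Nat.lt_succ_of_lt hi]
      · subst hi
        rw [if_neg (by omega)]
        have h1 : (c :: t).length - 1 - t.length = 0 := by simp
        simp only [h1, List.getD_cons_zero, Nat.sub_self]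
        unfold pvBit
        by_cases hc : c = '^' <;> simp [hc]
      · rw [if_neg (by omega)]
        have hb : pvBit c < 2 ^ (i - t.length) := by
          have : pvBit c ≤ 1 := by unfold pvBit; split <;> omega
          have : (2:Nat) ≤ 2 ^ (i - t.length) := by
            calc (2:Nat) = 2^1 := rfl
            _ ≤ 2 ^ (i - t.length) := Nat.pow_le_pow_right (by omega) (by omega)
          omega
        rw [Nat.testBit_lt_two_pow hb]
        simp; omega

def pvN (row : List Char) : List Char := pvStep ('.' :: row ++ ['.'])

theorem pvN_length (row : List Char) : (pvN row).length = row.length := by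
  unfold pvN; rw [pvStep_length]; simp

theorem pvN_ok (row : List Char) : pvOk (pvN row) := pvStep_ok _

theorem pvBitCount_val (l : List Char) :
    PySem.Int.bitCount ((pvVal l : Nat) : Int) = l.countP (· == '^') := by
  induction l using List.reverseRecOn with
  | nil => simp [pvVal, PySem.Int.bitCount_zero]
  | append_singleton l c ih =>
      rw [pvVal_append]
      have hb : pvBit c ≤ 1 := by unfold pvBit; split <;> omega
      by_cases h0 : 2 * pvVal l + pvBit c = 0
      · have hv : pvVal l = 0 := by omega
        have hbc : pvBit c = 0 := by omega
        rw [h0]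
        rw [hv] at ih
        simp only [Nat.cast_zero, PySem.Int.bitCount_zero] at ih ⊢
        rw [List.countP_append, ← ih]
        have : c ≠ '^' := by unfold pvBit at hbc; by_contra hc; simp [hc] at hbc
        simp [this]
      · rw [PySem.Int.bitCount_natCast (by omega)]
        have h2 : (2 * pvVal l + pvBit c) % 2 = pvBit c := by omega
        have h3 : (2 * pvVal l + pvBit c) / 2 = pvVal l := by omega
        rw [h2, h3, ih, List.countP_append]
        unfold pvBit
        by_cases hc : c = '^' <;> simp [hc] <;> omega

theorem pvSafe_inc (row : List Char) (hok : pvOk row) :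
    ((row.length : Int)) - (PySem.Int.bitCount ((pvVal row : Nat) : Int) : Int)
      = (row.countP (· == '.') : Int) := by
  rw [pvBitCount_val]
  have h := List.length_eq_countP_add_countP (l := row) (· == '^')
  have h2 : row.countP (fun a => decide ¬((a == '^') = true)) = row.countP (· == '.') := by
    apply List.countP_congr
    intro x hx
    rcases hok x hx with h | h <;> simp [h]
  rw [h2] at h
  omega

theorem pvCast_shiftL (m k : Nat) : ((m : Int) <<< k) = ((m <<< k : Nat) : Int) := by
  simp [Int.shiftLeft_eq, Nat.shiftLeft_eq]

theorem pvCast_shiftR (m k : Nat) : ((m : Int) >>> k) = ((m >>> k : Nat) : Int) := by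
  simp [Int.shiftRight_eq]

theorem pvNat_step (row : List Char) (hok : pvOk row) :
    ((pvVal row <<< 1) ^^^ (pvVal row >>> 1)) &&& (2 ^ row.length - 1) = pvVal (pvN row) := by
  apply Nat.eq_of_testBit_eq
  intro i
  rw [Nat.testBit_and, Nat.testBit_xor, Nat.testBit_shiftLeft, Nat.testBit_shiftRight,
      Nat.testBit_two_pow_sub_one, pvTestBit_val, pvTestBit_val, pvTestBit_val, pvN_length]
  by_cases hiw : i < row.length
  case neg => simp [hiw]
  have hlen : ('.' :: row ++ ['.']).length = row.length + 2 := by simp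
  have hget : (pvN row).getD (row.length - 1 - i) ' ' =
      if ('.' :: row ++ ['.']).getD (row.length - 1 - i) ' '
         ≠ ('.' :: row ++ ['.']).getD (row.length - 1 - i + 2) ' '
      then '^' else '.' := by
    rw [pvN]; exact pvStep_getD _ _ (by rw [hlen]; omega)
  have hmem : ∀ j, j < row.length → row.getD j ' ' = '.' ∨ row.getD j ' ' = '^' := by
    intro j hj
    rw [List.getD_eq_getElem _ _ hj]
    exact hok _ (List.getElem_mem hj)
  have hne : ∀ (a b : Char), (a = '.' ∨ a = '^') → (b = '.' ∨ b = '^') →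
      decide (a ≠ b) = ((decide (a = '^')).xor (decide (b = '^'))) := by
    intro a b ha hb
    rcases ha with h | h <;> rcases hb with h' | h' <;> simp [h, h']
  have hRHS : (decide ((pvN row).getD (row.length - 1 - i) ' ' = '^'))
      = decide (('.'::row++['.']).getD (row.length - 1 - i) ' '
                ≠ ('.'::row++['.']).getD (row.length - 1 - i + 2) ' ') := by
    rw [hget]; split <;> simp_all
  rw [hRHS]
  simp only [hiw, decide_true, Bool.and_true, Bool.true_and]
  -- left neighbour of the cell in the padded row
  have hL : ('.'::row++['.']).getD (row.length - 1 - i) ' '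
      = if i = row.length - 1 then '.' else row.getD (row.length - 2 - i) ' ' := by
    simp only [List.cons_append]
    by_cases h : i = row.length - 1
    · have h0 : row.length - 1 - i = 0 := by omega
      simp [h0, h]
    · have hk1 : row.length - 1 - i = (row.length - 2 - i) + 1 := by omega
      rw [hk1]
      simp only [List.getD_cons_succ]
      rw [if_neg h, List.getD_append _ _ _ _ (by omega)]
  -- right neighbour of the cell in the padded row
  have hR : ('.'::row++['.']).getD (row.length - 1 - i + 2) ' '
      = if i = 0 then '.' else row.getD (row.length - i) ' ' := by
    simp only [List.cons_append]
    by_cases h : i = 0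
    · have h2 : row.length - 1 - i + 2 = row.length + 1 := by omega
      rw [h2, if_pos h]
      simp only [List.getD_cons_succ]
      rw [List.getD_append_right _ _ _ _ (by omega)]
      simp
    · have h2 : row.length - 1 - i + 2 = (row.length - i) + 1 := by omega
      rw [h2, if_neg h]
      simp only [List.getD_cons_succ]
      rw [List.getD_append _ _ _ _ (by omega)]
  rw [hL, hR]
  by_cases hi0 : i = 0 <;> by_cases hiw1 : i = row.length - 1
  · -- width-1 row: both neighbours are walls
    rw [if_pos hi0, if_pos hiw1]
    subst hi0
    have hw1 : row.length = 1 := by omega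
    simp [hw1]
  · -- i = 0 : right neighbour is the wall
    rw [if_pos hi0, if_neg hiw1, hne _ _ (hmem (row.length - 2 - i) (by omega)) (Or.inl rfl)]
    subst hi0
    simp [show 1 + 0 < row.length by omega, show row.length - 1 - (1 + 0) = row.length - 2 - 0 by omega]
  · -- i = row.length - 1 : left neighbour is the wall
    rw [if_neg hi0, if_pos hiw1, hne _ _ (Or.inl rfl) (hmem (row.length - i) (by omega))]
    have h1 : ¬ (1 + i < row.length) := by omega
    have h2 : i - 1 < row.length := by omega
    have h3 : row.length - 1 - (i - 1) = row.length - i := by omega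
    simp [h1, h2, h3, show i ≥ 1 by omega]
  · -- interior cell
    rw [if_neg hi0, if_neg hiw1,
        hne _ _ (hmem (row.length - 2 - i) (by omega)) (hmem (row.length - i) (by omega))]
    have h1 : 1 + i < row.length := by omega
    have h2 : i - 1 < row.length := by omega
    have h3 : row.length - 1 - (i - 1) = row.length - i := by omega
    have h4 : row.length - 1 - (1 + i) = row.length - 2 - i := by omega
    simp [h1, h2, h3, h4, show i ≥ 1 by omega, Bool.xor_comm]

theorem pvMap_pyRange_step (cs : List Char) :
    (PySem.List.pyRange 1 (PySem.List.len cs - 1) 1).map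
      (fun j => if PySem.List.pyGetD cs (j - 1) ' ' ≠ PySem.List.pyGetD cs (j + 1) ' ' then '^' else '.')
      = pvStep cs := by
  rw [PySem.List.pyRange_one, List.map_map]
  have hn : ((PySem.List.len cs - 1) - 1).toNat = cs.length - 2 := by
    simp [PySem.List.len]
    omega
  rw [hn, ← pvMap_range_step cs]
  apply List.map_congr_left
  intro k hk
  rw [List.mem_range] at hk
  have e1 : (1 : Int) + (k : Nat) - 1 = ((k : Nat) : Int) := by omega
  have e2 : (1 : Int) + (k : Nat) + 1 = (((k + 2 : Nat)) : Int) := by omega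
  simp only [Function.comp_apply, e1, e2, PySem.List.pyGetD_natCast]

theorem pvBor_fold (l : List Int) (p : Int → Prop) [DecidablePred p] : ∀ m : Nat,
    l.foldl (fun c j => PySem.Int.bor (c <<< (1 : Nat)) (if p j then (1 : Int) else 0)) ((m : Nat) : Int)
      = ((l.foldl (fun c j => 2 * c + (if p j then (1 : Nat) else 0)) m : Nat) : Int) := by
  induction l with
  | nil => intro m; rfl
  | cons j t ih =>
      intro m
      simp only [List.foldl_cons]
      have h0 : (if p j then (1 : Int) else 0) = (((if p j then (1 : Nat) else 0) : Nat) : Int) := by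
        split <;> simp
      have hb : (if p j then (1 : Nat) else 0) < 2 ^ 1 := by split <;> omega
      rw [h0, pvCast_shiftL, PySem.Int.bor_natCast, ← Nat.shiftLeft_add_eq_or_of_lt hb m,
          show m <<< 1 + (if p j then (1:Nat) else 0) = 2 * m + (if p j then (1:Nat) else 0) by
            rw [Nat.shiftLeft_eq]; ring_nf]
      exact ih (2 * m + if p j then 1 else 0)

theorem pvCountGo (c : Char) : ∀ (fuel : Nat) (l : List Char) (acc : Nat), l.length ≤ fuel →
    PySem.Chars.count.go [c] fuel l acc = acc + l.countP (· == c) := by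
  intro fuel
  induction fuel with
  | zero => intro l acc h
            have : l = [] := by cases l <;> simp_all
            subst this
            simp [PySem.Chars.count.go]
  | succ n ih =>
      intro l acc h
      cases l with
      | nil => simp [PySem.Chars.count.go]
      | cons x t =>
          rw [PySem.Chars.count.go]
          by_cases hx : x = c
          · rw [if_pos (by simp [List.isPrefixOf, hx])]
            simp only [List.length_singleton, List.drop_one, List.tail_cons]
            rw [ih t (acc + 1) (by simp at h; omega)]
            simp [hx]
            omega
          · rw [if_neg (by simp [List.isPrefixOf]; exact fun hh => hx (by simp [hh]))]
            rw [ih t acc (by simp at h; omega)]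
            simp [hx]

theorem pvCount_dot (s : String) :
    PySem.Str.count s "." = s.toList.countP (· == '.') := by
  rw [PySem.Str.count_eq]
  show PySem.Chars.count s.toList ['.'] = _
  rw [PySem.Chars.count]
  simp only [List.isEmpty_cons, Bool.false_eq_true, if_false]
  exact (by simpa using pvCountGo '.' s.toList.length s.toList 0 le_rfl)

theorem pvInner_fold (cs : List Char) (acc : List Char) (s : Int) :
    (PySem.List.pyRange 1 (PySem.List.len cs - 1) 1).foldl
      (fun (t : List Char × Int) j =>
        if PySem.List.pyGetD cs (j - 1) ' ' ≠ PySem.List.pyGetD cs (j + 1) ' '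
        then (t.1 ++ ['^'], t.2)
        else (t.1 ++ ['.'], t.2 + 1)) (acc, s)
      = (acc ++ pvStep cs, s + ((pvStep cs).countP (· == '.') : Int)) := by
  rw [PySem.List.foldl_congr_mem _ _
      (fun (t : List Char × Int) j =>
        (t.1 ++ [if PySem.List.pyGetD cs (j - 1) ' ' ≠ PySem.List.pyGetD cs (j + 1) ' ' then '^' else '.'],
         t.2 + (if PySem.List.pyGetD cs (j - 1) ' ' ≠ PySem.List.pyGetD cs (j + 1) ' ' then 0 else 1)))
      (acc, s) (by intro t j _; split <;> rename_i h <;> simp [h])]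
  rw [PySem.List.foldl_prod_mk
      (f := fun (a : List Char) j =>
        a ++ [if PySem.List.pyGetD cs (j - 1) ' ' ≠ PySem.List.pyGetD cs (j + 1) ' ' then '^' else '.'])
      (g := fun (b : Int) j =>
        b + (if PySem.List.pyGetD cs (j - 1) ' ' ≠ PySem.List.pyGetD cs (j + 1) ' ' then 0 else 1))]
  rw [PySem.List.foldl_append_singleton_eq_map, pvMap_pyRange_step]
  rw [PySem.List.foldl_add]
  have hmap : (PySem.List.pyRange 1 (PySem.List.len cs - 1) 1).map
      (fun j => (if PySem.List.pyGetD cs (j - 1) ' ' ≠ PySem.List.pyGetD cs (j + 1) ' ' then (0:Int) else 1))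
      = (PySem.List.pyRange 1 (PySem.List.len cs - 1) 1).map
      (fun j => if (!(decide (PySem.List.pyGetD cs (j - 1) ' ' ≠ PySem.List.pyGetD cs (j + 1) ' '))) = true then (1:Int) else 0) := by
    apply List.map_congr_left
    intro j _
    by_cases h : PySem.List.pyGetD cs (j - 1) ' ' ≠ PySem.List.pyGetD cs (j + 1) ' ' <;> simp [h]
  rw [hmap, PySem.List.sum_map_ite_one_zero]
  congr 2
  have : (fun (j : Int) => !(decide (PySem.List.pyGetD cs (j - 1) ' ' ≠ PySem.List.pyGetD cs (j + 1) ' ')))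
      = (fun j => ((if PySem.List.pyGetD cs (j - 1) ' ' ≠ PySem.List.pyGetD cs (j + 1) ' ' then '^' else '.') == '.')) := by
    funext j
    by_cases h : PySem.List.pyGetD cs (j - 1) ' ' ≠ PySem.List.pyGetD cs (j + 1) ' ' <;> simp [h]
  have hc : List.countP
      (fun j => ((if PySem.List.pyGetD cs (j - 1) ' ' ≠ PySem.List.pyGetD cs (j + 1) ' ' then '^' else '.') == '.'))
      (PySem.List.pyRange 1 (PySem.List.len cs - 1) 1)
      = List.countP (· == '.')
        ((PySem.List.pyRange 1 (PySem.List.len cs - 1) 1).map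
          (fun j => if PySem.List.pyGetD cs (j - 1) ' ' ≠ PySem.List.pyGetD cs (j + 1) ' ' then '^' else '.')) := by
    rw [List.countP_map]
    rfl
  rw [this, hc, pvMap_pyRange_step]

def pvFa (st : List Char × Int) : List Char × Int :=
  ('.' :: pvStep st.1 ++ ['.'], st.2 + ((pvStep st.1).countP (· == '.') : Int))

def pvFb (w : Nat) (st : Int × Int) : Int × Int :=
  let nx := PySem.Int.band (PySem.Int.bxor (st.1 <<< (1 : Nat)) (st.1 >>> (1 : Nat))) ((1 : Int) <<< w - 1)
  (nx, st.2 + (w : Int) - (PySem.Int.bitCount nx : Int))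

theorem pvFb_step (row : List Char) (s : Int) (hok : pvOk row) :
    pvFb row.length ((pvVal row : Nat), s)
      = (((pvVal (pvN row) : Nat) : Int), s + ((pvN row).countP (· == '.') : Int)) := by
  have hmask : ((1 : Int) <<< row.length - 1) = ((2 ^ row.length - 1 : Nat) : Int) := by
    have h1 : ((1 : Int) <<< row.length) = ((1 <<< row.length : Nat) : Int) := by
      rw [show (1 : Int) = ((1 : Nat) : Int) by norm_num, pvCast_shiftL]
    rw [h1, show (1 <<< row.length : Nat) = 2 ^ row.length by simp [Nat.shiftLeft_eq]]
    push_cast [Nat.one_le_two_pow]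
    ring
  have hnx : PySem.Int.band
      (PySem.Int.bxor (((pvVal row : Nat) : Int) <<< (1:Nat)) (((pvVal row : Nat) : Int) >>> (1:Nat)))
      ((1 : Int) <<< row.length - 1) = ((pvVal (pvN row) : Nat) : Int) := by
    rw [pvCast_shiftL, pvCast_shiftR, PySem.Int.bxor_natCast, hmask, PySem.Int.band_natCast,
        pvNat_step row hok]
  unfold pvFb
  simp only [hnx]
  congr 1
  have := pvSafe_inc (pvN row) (pvN_ok row)
  rw [pvN_length] at this
  omega

theorem pvKey (n : Nat) : ∀ (row : List Char) (s : Int), pvOk row →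
    ((pvFb row.length)^[n] (((pvVal row : Nat) : Int), s)).2
      = ((pvFa)^[n] ('.' :: row ++ ['.'], s)).2 := by
  induction n with
  | zero => intro row s _; rfl
  | succ n ih =>
      intro row s hok
      rw [Function.iterate_succ_apply, Function.iterate_succ_apply, pvFb_step row s hok]
      have hFa : pvFa ('.' :: row ++ ['.'], s) = ('.' :: pvN row ++ ['.'], s + ((pvN row).countP (· == '.') : Int)) := by
        simp [pvFa, pvN]
      rw [hFa]
      have := ih (pvN row) (s + ((pvN row).countP (· == '.') : Int)) (pvN_ok row)
      rw [pvN_length] at this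
      exact this


theorem pvMain (input_str : String) (length : Int) :
    minesweep input_str length = minesweep_alt input_str length := by
  unfold minesweep minesweep_alt
  simp only []
  by_cases hl : length ≤ 1
  · rw [if_pos hl, PySem.List.pyRange_one_eq_nil (by omega)]
    simp only [List.foldl_nil]
    rw [PySem.List.foldl_ite_add_one (p := fun c => c = '.'), pvCount_dot]
    norm_num
    apply List.countP_congr
    intro c _
    simp
  · rw [if_neg hl]
    -- A's outer body is pvFa
    have hbody : (fun (st : List Char × Int) (_ : Int) =>
        ('.' :: ((PySem.List.pyRange 1 (PySem.List.len st.1 - 1) 1).foldl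
          (fun (t : List Char × Int) j =>
            if PySem.List.pyGetD st.1 (j - 1) ' ' ≠ PySem.List.pyGetD st.1 (j + 1) ' '
            then (t.1 ++ ['^'], t.2)
            else (t.1 ++ ['.'], t.2 + 1)) (([] : List Char), st.2)).1 ++ ['.'],
         ((PySem.List.pyRange 1 (PySem.List.len st.1 - 1) 1).foldl
          (fun (t : List Char × Int) j =>
            if PySem.List.pyGetD st.1 (j - 1) ' ' ≠ PySem.List.pyGetD st.1 (j + 1) ' '
            then (t.1 ++ ['^'], t.2)
            else (t.1 ++ ['.'], t.2 + 1)) (([] : List Char), st.2)).2))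
        = fun st _ => pvFa st := by
      funext st j
      rw [pvInner_fold st.1 [] st.2]
      simp [pvFa]
    rw [hbody, PySem.List.pyRange_one_cons (by omega : (0:Int) < length - 1), List.foldl_cons,
        pvFoldl_const, PySem.List.length_pyRange_one]
    have hsafe0 : List.foldl (fun a c => if c = '.' then a + 1 else a) 0 input_str.toList
        = ((PySem.Str.count input_str "." : Nat) : Int) := by
      rw [PySem.List.foldl_ite_add_one (p := fun c => c = '.'), pvCount_dot]
      norm_num
      apply List.countP_congr
      intro c _
      simp
    -- B's first loop produces the bitmask of the first evolved row
    have hcur : (PySem.List.pyRange 1 ((input_str.toList.length : Int) + 1) 1).foldl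
        (fun (c : Int) j =>
          PySem.Int.bor (c <<< (1 : Nat))
            (if PySem.List.pyGetD ('.' :: input_str.toList ++ ['.']) (j - 1) ' '
                ≠ PySem.List.pyGetD ('.' :: input_str.toList ++ ['.']) (j + 1) ' '
             then (1 : Int) else 0)) 0
        = ((pvVal (pvN input_str.toList) : Nat) : Int) := by
      have h := pvBor_fold (PySem.List.pyRange 1 ((input_str.toList.length : Int) + 1) 1)
        (fun j => PySem.List.pyGetD ('.' :: input_str.toList ++ ['.']) (j - 1) ' '
            ≠ PySem.List.pyGetD ('.' :: input_str.toList ++ ['.']) (j + 1) ' ') 0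
      rw [Nat.cast_zero] at h
      rw [h]
      congr 1
      have hb : (fun (c : Nat) (j : Int) => 2 * c +
            (if PySem.List.pyGetD ('.' :: input_str.toList ++ ['.']) (j - 1) ' '
                ≠ PySem.List.pyGetD ('.' :: input_str.toList ++ ['.']) (j + 1) ' '
             then (1 : Nat) else 0))
          = fun (c : Nat) (j : Int) => 2 * c + pvBit
            (if PySem.List.pyGetD ('.' :: input_str.toList ++ ['.']) (j - 1) ' '
                ≠ PySem.List.pyGetD ('.' :: input_str.toList ++ ['.']) (j + 1) ' '
             then '^' else '.') := by
        funext c j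
        split <;> simp [pvBit]
      rw [hb]
      have hrange : ((input_str.toList.length : Int) + 1)
          = PySem.List.len ('.' :: input_str.toList ++ ['.']) - 1 := by
        simp [PySem.List.len]
      rw [hrange,
          ← List.foldl_map
            (f := fun j => if PySem.List.pyGetD ('.' :: input_str.toList ++ ['.']) (j - 1) ' '
                ≠ PySem.List.pyGetD ('.' :: input_str.toList ++ ['.']) (j + 1) ' ' then '^' else '.')
            (g := fun (c : Nat) ch => 2 * c + pvBit ch),
          pvMap_pyRange_step]
      rfl
    rw [hcur]
    -- B's outer loop body is pvFb
    rw [show (fun (st : Int × Int) (_ : Int) =>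
        (PySem.Int.band (PySem.Int.bxor (st.1 <<< (1:Nat)) (st.1 >>> (1:Nat)))
            ((1 : Int) <<< input_str.toList.length - 1),
          st.2 + (input_str.toList.length : Int) -
            (PySem.Int.bitCount (PySem.Int.band (PySem.Int.bxor (st.1 <<< (1:Nat)) (st.1 >>> (1:Nat)))
              ((1 : Int) <<< input_str.toList.length - 1)) : Int)))
        = fun st _ => pvFb input_str.toList.length st from rfl,
        pvFoldl_const, PySem.List.length_pyRange_one]
    have hcnt := pvSafe_inc (pvN input_str.toList) (pvN_ok input_str.toList)
    rw [pvN_length] at hcnt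
    have hsafe1 : ((PySem.Str.count input_str "." : Nat) : Int) + (input_str.toList.length : Int) -
        (PySem.Int.bitCount ((pvVal (pvN input_str.toList) : Nat) : Int) : Int)
        = List.foldl (fun a c => if c = '.' then a + 1 else a) 0 input_str.toList
          + ((pvN input_str.toList).countP (· == '.') : Int) := by
      rw [hsafe0]
      omega
    rw [hsafe1]
    have hFa : pvFa ('.' :: input_str.toList ++ ['.'],
        List.foldl (fun a c => if c = '.' then a + 1 else a) 0 input_str.toList)
        = ('.' :: pvN input_str.toList ++ ['.'],
           List.foldl (fun a c => if c = '.' then a + 1 else a) 0 input_str.toList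
             + ((pvN input_str.toList).countP (· == '.') : Int)) := by
      simp [pvFa, pvN]
    rw [hFa, show length - 1 - (0 + 1) = length - 2 by ring]
    rw [show input_str.toList.length = (pvN input_str.toList).length from (pvN_length _).symm,
        show length - 2 - 0 = length - 2 by ring]
    exact (pvKey (length - 2).toNat (pvN input_str.toList) _ (pvN_ok input_str.toList)).symm

-- ===== VERDICT (by name: the statement is the Claim_ definition above) =====
theorem minesweep_spec : Claim_equal_minesweep := by
  intro input_str length _
  exact pvMain input_str length
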